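-- pv_equiv track=rewrite | github.com/filp8/algoritmi | algo1/esTipo2Algo1.py | sommaAbs
-- ===== SOURCE A (Python) =====
-- def sommaAbs(A:list[int],B:list[int]):
--     i = 0
--     j = 0
--     while i < len(A)-1:
--         if abs(A[i]-B[j]) <= 3:
--             return 1
--         if j <= len(B)-2:
--             j += 1
--         elif j == len(B)-1:
--             i += 1
--             j = 0
--     return 0
-- ===== SOURCE B (Python) =====
-- def sommaAbs(A: list[int], B: list[int]):
--     # Sort B once, then for each a in A[:-1] binary-search the first
--     # element >= a-3 and test whether it is <= a+3.
--     xs = sorted(B)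
--     for a in A[:-1]:
--         lo, hi = 0, len(xs)
--         while lo < hi:
--             mid = (lo + hi) // 2
--             if xs[mid] < a - 3:
--                 lo = mid + 1
--             else:
--                 hi = mid
--         if lo < len(xs) and xs[lo] <= a + 3:
--             return 1
--     return 0
-- ===== Notes on version B (the rewrite author's own statement) =====
-- stated objective: alternative
-- what changed: Replaces A's one-step-at-a-time nested scan (advance j through B, reset and advance i) by sorting B once and binary-searching the window [a-3, a+3] for each element of A[:-1]; it trades A's early-exit scan for an O((n+m) log m) worst case.
import Mathlib
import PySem

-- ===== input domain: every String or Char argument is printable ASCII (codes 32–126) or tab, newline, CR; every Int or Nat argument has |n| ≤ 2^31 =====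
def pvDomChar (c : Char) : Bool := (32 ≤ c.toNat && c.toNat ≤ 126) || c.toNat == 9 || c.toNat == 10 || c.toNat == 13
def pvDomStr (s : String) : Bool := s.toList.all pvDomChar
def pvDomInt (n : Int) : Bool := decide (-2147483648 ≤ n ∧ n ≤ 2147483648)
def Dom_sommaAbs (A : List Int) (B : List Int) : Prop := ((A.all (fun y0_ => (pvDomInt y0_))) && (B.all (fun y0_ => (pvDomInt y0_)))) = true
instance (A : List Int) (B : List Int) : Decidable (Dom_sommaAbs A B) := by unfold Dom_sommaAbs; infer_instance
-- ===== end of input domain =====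

-- B replaces A's step-by-step nested scan of A[:-1]×B by sorting B once and
-- binary-searching the window [a-3, a+3] for each a in A[:-1] (objective: alternative).

-- ===== PORT A =====
-- A's while loop, one state step per fuel unit (state = (i, j), both Python ints).
-- The fuel len(A)*len(B)+1 bounds the number of loop iterations, which is at most
-- (len(A)-1)*len(B) + 1 whenever the loop terminates (B ≠ [] or len(A) ≤ 1).
-- B[j] on B = [] raises IndexError in Python (excluded by Pre_); pyGetD's default
-- is only reached there.
def sommaAbsLoop (A B : List Int) : Nat → Int → Int → Int
  | 0, _, _ => 0
  | fuel+1, i, j =>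
    if i < (A.length : Int) - 1 then
      if |PySem.List.pyGetD A i 0 - PySem.List.pyGetD B j 0| ≤ 3 then 1
      else if j ≤ (B.length : Int) - 2 then sommaAbsLoop A B fuel i (j+1)
      else if j = (B.length : Int) - 1 then sommaAbsLoop A B fuel (i+1) 0
      else sommaAbsLoop A B fuel i j
    else 0

def sommaAbs (A : List Int) (B : List Int) : Int :=
  sommaAbsLoop A B (A.length * B.length + 1) 0 0

-- ===== PORT B =====
-- Source B's hand-written lower-bound binary search (lo, hi are Python ints that are
-- provably nonnegative, so Nat counters are exact; xs[mid] is always in range).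
-- the while loop is totalized by the fuel n; hi - lo strictly decreases each
-- iteration, so the initial fuel xs.length ≥ hi - lo is never exhausted
def bsearchLow (xs : List Int) (t : Int) : Nat → Nat → Nat → Nat
  | 0, lo, _ => lo
  | n + 1, lo, hi =>
    if lo < hi then
      let mid := (lo + hi) / 2
      if xs.getD mid 0 < t then bsearchLow xs t n (mid + 1) hi
      else bsearchLow xs t n lo mid
    else lo

-- the 'for a in A[:-1]' loop of Source B
def sommaAbsAltLoop (xs : List Int) : List Int → Int
  | [] => 0
  | a :: rest =>
    let lo := bsearchLow xs (a - 3) xs.length 0 xs.length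
    if lo < xs.length ∧ xs.getD lo 0 ≤ a + 3 then 1
    else sommaAbsAltLoop xs rest

-- A[:-1] is exactly List.dropLast; sorted(B) is PySem.List.sorted with identity key.
def sommaAbs_alt (A : List Int) (B : List Int) : Int :=
  sommaAbsAltLoop (PySem.List.sorted B (fun x => x) false) A.dropLast

-- ===== PRECONDITION & SPEC =====
-- Pre_ excludes only the inputs where A raises IndexError (B empty while len(A) ≥ 2:
-- the very first read B[0] is out of range); B returns 0 there, no value of A exists.
def Pre_sommaAbs (A : List Int) (B : List Int) : Prop := 2 ≤ A.length → B ≠ []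
instance (A : List Int) (B : List Int) : Decidable (Pre_sommaAbs A B) := by
  unfold Pre_sommaAbs; infer_instance

def pvWitness_sommaAbs : List Int × List Int := ([0, 10], [4])

def Spec_sommaAbs (A : List Int) (B : List Int) (out : Int) : Prop := out = sommaAbs_alt A B
instance (A : List Int) (B : List Int) (out : Int) : Decidable (Spec_sommaAbs A B out) := by
  unfold Spec_sommaAbs; infer_instance

-- ===== CLAIM (what is proved, stated in full; the proofs are below) =====
def Claim_equal_sommaAbs : Prop := ∀ (A : List Int) (B : List Int), Dom_sommaAbs A B → Pre_sommaAbs A B → Spec_sommaAbs A B (sommaAbs A B)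

-- ===== LEMMAS AND PROOFS =====

-- the common mathematical content: "some b within distance 3 of a"
def pvNear (B : List Int) (a : Int) : Bool := B.any (fun b => decide (|a - b| ≤ 3))

def pvMono (xs : List Int) : Prop :=
  ∀ p q : Nat, p ≤ q → q < xs.length → xs.getD p 0 ≤ xs.getD q 0

theorem pvMono_sorted (B : List Int) : pvMono (PySem.List.sorted B (fun x => x) false) := by
  intro p q hpq hq
  rcases Nat.eq_or_lt_of_le hpq with h | h
  · subst h; exact le_refl _
  · have hp : p < (PySem.List.sorted B (fun x => x) false).length := lt_trans h hq
    have := (List.pairwise_iff_getElem).mp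
      (PySem.List.sorted_pairwise (xs := B) (key := fun x => x)) p q hp hq h
    rw [List.getD_eq_getElem _ 0 hp, List.getD_eq_getElem _ 0 hq]
    exact this

theorem bsearchLow_spec (xs : List Int) (t : Int) (hm : pvMono xs) :
    ∀ n lo hi, hi - lo ≤ n → lo ≤ hi → hi ≤ xs.length →
    (∀ k, k < lo → xs.getD k 0 < t) →
    (∀ k, hi ≤ k → k < xs.length → t ≤ xs.getD k 0) →
    (∀ k, k < bsearchLow xs t n lo hi → xs.getD k 0 < t) ∧
    (bsearchLow xs t n lo hi < xs.length → t ≤ xs.getD (bsearchLow xs t n lo hi) 0) ∧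
    bsearchLow xs t n lo hi ≤ xs.length := by
  intro n
  induction n with
  | zero =>
    intro lo hi hn hlh hhl hlo hhi
    rw [bsearchLow]
    exact ⟨hlo, fun h => hhi lo (by omega) h, by omega⟩
  | succ n ih =>
    intro lo hi hn hlh hhl hlo hhi
    by_cases h : lo < hi
    · rw [bsearchLow, if_pos h]
      have hmid1 : lo ≤ (lo + hi) / 2 := by omega
      have hmid2 : (lo + hi) / 2 < hi := by omega
      by_cases hc : xs.getD ((lo + hi) / 2) 0 < t
      · rw [if_pos hc]
        refine ih ((lo + hi) / 2 + 1) hi (by omega) (by omega) hhl ?_ hhi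
        intro k hk
        exact lt_of_le_of_lt (hm k ((lo + hi) / 2) (by omega) (by omega)) hc
      · rw [if_neg hc]
        refine ih lo ((lo + hi) / 2) (by omega) (by omega) (by omega) hlo ?_
        intro k hk hk2
        exact le_trans (not_lt.mp hc) (hm ((lo + hi) / 2) k hk hk2)
    · rw [bsearchLow, if_neg h]
      exact ⟨hlo, fun hlt => hhi lo (by omega) hlt, by omega⟩

theorem bsearchLow_hit (xs : List Int) (a : Int) (hm : pvMono xs) :
    (bsearchLow xs (a - 3) xs.length 0 xs.length < xs.length ∧
      xs.getD (bsearchLow xs (a - 3) xs.length 0 xs.length) 0 ≤ a + 3) ↔ pvNear xs a = true := by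
  obtain ⟨h1, h2, h3⟩ := bsearchLow_spec xs (a - 3) hm xs.length 0 xs.length
    (by omega) (by omega) (le_refl _) (by omega) (by omega)
  set lo := bsearchLow xs (a - 3) xs.length 0 xs.length with hlo
  constructor
  · rintro ⟨hl, hle⟩
    have hmem : xs.getD lo 0 ∈ xs := by
      rw [List.getD_eq_getElem xs 0 hl]; exact List.getElem_mem hl
    have := h2 hl
    simp only [pvNear, List.any_eq_true]
    exact ⟨xs.getD lo 0, hmem, by rw [decide_eq_true_iff, abs_le]; omega⟩
  · intro hnear
    simp only [pvNear, List.any_eq_true, decide_eq_true_iff] at hnear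
    obtain ⟨b, hb, habs⟩ := hnear
    obtain ⟨k, hk, hkb⟩ := List.getElem_of_mem hb
    have hkd : xs.getD k 0 = b := by rw [List.getD_eq_getElem xs 0 hk, hkb]
    have hge : a - 3 ≤ xs.getD k 0 := by rw [hkd]; rw [abs_le] at habs; omega
    have hlok : lo ≤ k := by
      by_contra hnc
      exact absurd (h1 k (by omega)) (not_lt.mpr hge)
    have hl : lo < xs.length := lt_of_le_of_lt hlok hk
    refine ⟨hl, ?_⟩
    have := hm lo k hlok hk
    rw [abs_le] at habs
    omega

theorem altLoop_eq (xs : List Int) (hm : pvMono xs) :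
    ∀ as : List Int,
      sommaAbsAltLoop xs as = if as.any (fun a => pvNear xs a) then 1 else 0 := by
  intro as
  induction as with
  | nil => simp [sommaAbsAltLoop]
  | cons a rest ih =>
    rw [sommaAbsAltLoop]
    by_cases h : bsearchLow xs (a - 3) xs.length 0 xs.length < xs.length ∧
        xs.getD (bsearchLow xs (a - 3) xs.length 0 xs.length) 0 ≤ a + 3
    · rw [if_pos h]
      have := (bsearchLow_hit xs a hm).mp h
      simp [List.any_cons, this]
    · rw [if_neg h]
      have : pvNear xs a = false := by
        by_contra hc
        exact h ((bsearchLow_hit xs a hm).mpr (by simpa using hc))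
      simp [List.any_cons, this, ih]

theorem near_sorted (B : List Int) (a : Int) :
    pvNear (PySem.List.sorted B (fun x => x) false) a = pvNear B a := by
  have hperm : (PySem.List.sorted B (fun x => x) false).Perm B :=
    PySem.List.sorted_perm B (fun x => x) false
  rw [Bool.eq_iff_iff]
  simp only [pvNear, List.any_eq_true]
  constructor
  · rintro ⟨x, hx, hxp⟩; exact ⟨x, hperm.mem_iff.mp hx, hxp⟩
  · rintro ⟨x, hx, hxp⟩; exact ⟨x, hperm.mem_iff.mpr hx, hxp⟩

-- the invariant of A's while loop, by induction on fuel
theorem loopA_eq (A B : List Int) :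
    ∀ (fuel : Nat) (i j : Nat), j < B.length →
      (A.length - 1 - i) * B.length + (B.length - j) ≤ fuel →
      sommaAbsLoop A B fuel (i : Int) (j : Int) =
        if (i + 1 < A.length ∧ (B.drop j).any (fun b => decide (|A.getD i 0 - b| ≤ 3)))
            ∨ (A.dropLast.drop (i + 1)).any (fun a => pvNear B a) then 1 else 0 := by
  intro fuel
  induction fuel with
  | zero => intro i j hj hf; omega
  | succ fuel ih =>
    intro i j hj hf
    rw [sommaAbsLoop]
    by_cases hi : (i : Int) < (A.length : Int) - 1
    · rw [if_pos hi]
      have hiN : i + 1 < A.length := by omega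
      have hA : PySem.List.pyGetD A (i : Int) 0 = A.getD i 0 := PySem.List.pyGetD_natCast ..
      have hB : PySem.List.pyGetD B (j : Int) 0 = B.getD j 0 := PySem.List.pyGetD_natCast ..
      have hdropj : B.drop j = B[j] :: B.drop (j + 1) := List.drop_eq_getElem_cons hj
      have hBj : B.getD j 0 = B[j] := List.getD_eq_getElem B 0 hj
      by_cases habs : |A.getD i 0 - PySem.List.pyGetD B (j : Int) 0| ≤ 3
      · rw [hA, if_pos habs]
        rw [hB, hBj] at habs
        have : (B.drop j).any (fun b => decide (|A.getD i 0 - b| ≤ 3)) = true := by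
          rw [hdropj]
          simp only [List.any_cons, Bool.or_eq_true, decide_eq_true_eq]
          exact Or.inl habs
        rw [if_pos (Or.inl ⟨hiN, this⟩)]
      · rw [hA, if_neg habs]
        rw [hB, hBj] at habs
        have hnotj : ((B.drop j).any fun b => decide (|A.getD i 0 - b| ≤ 3)) =
            ((B.drop (j+1)).any fun b => decide (|A.getD i 0 - b| ≤ 3)) := by
          rw [hdropj, List.any_cons, decide_eq_false habs, Bool.false_or]
        by_cases hj2 : (j : Int) ≤ (B.length : Int) - 2
        · rw [if_pos hj2]
          have hj1 : j + 1 < B.length := by omega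
          have hrec := ih i (j + 1) hj1 (by omega)
          push_cast at hrec
          rw [hrec, hnotj]
        · rw [if_neg hj2]
          have hjl : j = B.length - 1 := by omega
          have hjeq : (j : Int) = (B.length : Int) - 1 := by omega
          rw [if_pos hjeq]
          have hrow : ((B.drop (j+1)).any fun b => decide (|A.getD i 0 - b| ≤ 3)) = false := by
            have : B.drop (j + 1) = [] := List.drop_eq_nil_of_le (by omega)
            rw [this]; rfl
          have hfuel' : (A.length - 1 - (i + 1)) * B.length + (B.length - 0) ≤ fuel := by
            have hd : 1 ≤ A.length - 1 - i := by omega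
            have : (A.length - 1 - (i + 1)) * B.length + B.length
                = (A.length - 1 - i) * B.length := by
              have h1 : A.length - 1 - (i + 1) + 1 = A.length - 1 - i := by omega
              calc (A.length - 1 - (i + 1)) * B.length + B.length
                  = (A.length - 1 - (i + 1) + 1) * B.length := by ring
                _ = (A.length - 1 - i) * B.length := by rw [h1]
            omega
          have hrec := ih (i + 1) 0 (by omega) hfuel'
          push_cast at hrec
          rw [hrec, hnotj, hrow]
          -- both sides reduce to "rest from i+1": split A.dropLast.drop (i+1)
          by_cases hi2 : i + 1 < A.length - 1
          · have hlen : i + 1 < A.dropLast.length := by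
              rw [List.length_dropLast]; omega
            have hdl : A.dropLast.drop (i + 1)
                = A.dropLast[i+1]'hlen :: A.dropLast.drop (i + 2) :=
              List.drop_eq_getElem_cons hlen
            have hidx : A.dropLast[i+1]'hlen = A[i+1]'(by omega) := by
              simp [List.getElem_dropLast]
            have hgd : A.getD (i + 1) 0 = A[i+1]'(by omega) :=
              List.getD_eq_getElem A 0 (by omega)
            simp only [hdl, hidx, List.any_cons, List.drop_zero, Bool.or_eq_true,
              pvNear, hgd]
            have hi2' : i + 1 + 1 < A.length := by omega
            by_cases hany : (B.any fun b => decide (|A[i+1]'(by omega) - b| ≤ 3)) = true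
            · simp [hany, hi2']
            · simp only [Bool.not_eq_true] at hany
              simp [hany, hi2']
          · have hdl1 : A.dropLast.drop (i + 1) = [] :=
              List.drop_eq_nil_of_le (by simp; omega)
            have hdl2 : A.dropLast.drop (i + 2) = [] :=
              List.drop_eq_nil_of_le (by simp; omega)
            have hi2' : ¬ (i + 1 + 1 < A.length) := by omega
            simp [hdl1, hdl2, hi2']
    · rw [if_neg hi]
      have h1 : ¬ (i + 1 < A.length) := by omega
      have h2 : A.dropLast.drop (i + 1) = [] :=
        List.drop_eq_nil_of_le (by simp; omega)
      simp [h1, h2]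

theorem sommaAbs_eq_near (A B : List Int) (hpre : Pre_sommaAbs A B) :
    sommaAbs A B = if A.dropLast.any (fun a => pvNear B a) then 1 else 0 := by
  by_cases hA : 2 ≤ A.length
  · have hB : B ≠ [] := hpre hA
    have hBl : 1 ≤ B.length := List.length_pos_iff.mpr hB
    have hfuel : (A.length - 1 - 0) * B.length + (B.length - 0) ≤ A.length * B.length + 1 := by
      have : (A.length - 1) * B.length + B.length = A.length * B.length := by
        have h1 : A.length - 1 + 1 = A.length := by omega
        calc (A.length - 1) * B.length + B.length
            = (A.length - 1 + 1) * B.length := by ring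
          _ = A.length * B.length := by rw [h1]
      simp only [Nat.sub_zero]
      omega
    have hrec := loopA_eq A B (A.length * B.length + 1) 0 0 (by omega) hfuel
    push_cast at hrec
    rw [sommaAbs, hrec]
    have hlen0 : 0 < A.dropLast.length := by rw [List.length_dropLast]; omega
    have hdl : A.dropLast.drop 0 = A.dropLast[0]'hlen0 :: A.dropLast.drop 1 :=
      List.drop_eq_getElem_cons hlen0
    rw [List.drop_zero] at hdl
    have hidx : A.dropLast[0]'hlen0 = A[0]'(by omega) := by
      simp [List.getElem_dropLast]
    have hgd : A.getD 0 0 = A[0]'(by omega) := List.getD_eq_getElem A 0 (by omega)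
    conv_rhs => rw [hdl]
    simp only [List.any_cons, List.drop_zero, Bool.or_eq_true, hidx, hgd, pvNear]
    have h1 : 0 + 1 < A.length := by omega
    by_cases hany : (B.any fun b => decide (|A[0]'(by omega) - b| ≤ 3)) = true
    · simp [hany, h1]
    · simp only [Bool.not_eq_true] at hany
      simp [hany, h1]
  · -- len(A) ≤ 1: the loop exits at once and A[:-1] is empty
    have hdl : A.dropLast = [] := by
      apply List.eq_nil_of_length_eq_zero; simp; omega
    have hi : ¬ ((0 : Int) < (A.length : Int) - 1) := by omega
    rw [sommaAbs, sommaAbsLoop, if_neg hi, hdl]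
    simp

-- ===== VERDICT (by name: the statement is the Claim_ definition above) =====
theorem sommaAbs_spec : Claim_equal_sommaAbs := by
  intro A B _hdom hpre
  unfold Spec_sommaAbs sommaAbs_alt
  rw [sommaAbs_eq_near A B hpre,
    altLoop_eq (PySem.List.sorted B (fun x => x) false) (pvMono_sorted B) A.dropLast]
  have hfe : (fun a => pvNear (PySem.List.sorted B (fun x => x) false) a)
      = (fun a => pvNear B a) := funext (near_sorted B)
  rw [hfe]
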